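-- pv_equiv track=rewrite | github.com/takeshi-teshima/incorporating-causal-graphical-prior-knowledge-into-predictive-modeling-via-simple-data-augmentation | causal_data_augmentation/causal_data_augmentation/util.py | build_batch
-- ===== SOURCE A (Python) =====
-- import itertools
-- import math
--
-- def build_batch(items, batch_size: int, item_count=None):
--     '''Generates balanced baskets from iterable.
--     Params:
--         items : Iterable.
--         batch_size : Maximum size of each batch. Surplus items are split evenly in the last two chunks.
--         item_count : If `items` does not support `len()`, provide this parameter.
--
--     Notes:
--         Reference: https://stackoverflow.com/questions/312443/how-do-you-split-a-list-into-evenly-sized-chunks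
--
--     Examples:
--         >>> from pprint import pprint
--         >>> pprint(list(build_batch(list(range(11, 40)), 11)))
--         [[11, 12, 13, 14, 15, 16, 17, 18, 19, 20, 21],
--          [22, 23, 24, 25, 26, 27, 28, 29, 30],
--          [31, 32, 33, 34, 35, 36, 37, 38, 39]]
--
--         >>> pprint(list(build_batch(list(range(0, 10)), 11)))
--         [[0, 1, 2, 3, 4, 5, 6, 7, 8, 9]]
--
--         >>> pprint(list(build_batch(list(range(11, 41)), 10)))
--         [[11, 12, 13, 14, 15, 16, 17, 18, 19, 20],
--          [21, 22, 23, 24, 25, 26, 27, 28, 29, 30],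
--          [31, 32, 33, 34, 35, 36, 37, 38, 39, 40]]
--     '''
--     iterable = iter(items)
--     item_count = item_count or len(items)
--
--     is_last_chunk_uneven = (item_count % batch_size != 0)
--     last_sum = batch_size + (item_count % batch_size)
--     if is_last_chunk_uneven:
--         last_sizes = [math.ceil(last_sum / 2), math.floor(last_sum / 2)]
--     batch_count = 0
--     while True:
--         remaining_count = item_count - batch_count * batch_size
--
--         if is_last_chunk_uneven and (remaining_count < 2 * batch_size) \
--                 and (remaining_count > batch_size):
--             batch = list(itertools.islice(iterable, math.ceil(last_sum / 2)))
--         elif is_last_chunk_uneven and (remaining_count < 2 * batch_size):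
--             batch = list(itertools.islice(iterable, math.floor(last_sum / 2)))
--         else:
--             batch = list(itertools.islice(iterable, batch_size))
--
--         batch_count += 1
--
--         if len(batch) > 0:
--             yield batch
--         else:
--             break
-- ===== SOURCE B (Python) =====
-- def _chunk(xs, k):
--     return [xs[i:i + k] for i in range(0, len(xs), k)]
--
--
-- def build_batch(items, batch_size: int, item_count=None):
--     """Slice-based rework: materialize the list, compute closed-form cut
--     offsets for the three regions (full-sized head, balanced middle chunk,
--     floor-sized tail) and chunk each region by plain index slicing; no
--     iterator streaming and no per-batch size decisions."""
--     xs = list(items)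
--     n = item_count or len(xs)
--     r = n % batch_size
--     if r == 0:
--         yield from _chunk(xs, batch_size)
--         return
--     q = n // batch_size
--     lo = (batch_size + r) // 2
--     hi = batch_size + r - lo
--     cut = max(q - 1, 0) * batch_size
--     mid = xs[cut:cut + hi] if q >= 1 else []
--     tail_start = cut + (hi if q >= 1 else 0)
--     yield from _chunk(xs[:cut], batch_size) + ([mid] if mid else []) + _chunk(xs[tail_start:], lo)
-- ===== Notes on version B (the rewrite author's own statement) =====
-- stated objective: alternative
-- what changed: Replaces the streaming while-True loop, whose every iteration re-derives a chunk size from a remaining-count case analysis and consumes an iterator with islice, by a non-streaming slicing scheme: compute closed-form cut offsets, split the materialized list into three regions (full head, balanced middle, floor tail), chunk each region with an index-slice comprehension and concatenate.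
import Mathlib
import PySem

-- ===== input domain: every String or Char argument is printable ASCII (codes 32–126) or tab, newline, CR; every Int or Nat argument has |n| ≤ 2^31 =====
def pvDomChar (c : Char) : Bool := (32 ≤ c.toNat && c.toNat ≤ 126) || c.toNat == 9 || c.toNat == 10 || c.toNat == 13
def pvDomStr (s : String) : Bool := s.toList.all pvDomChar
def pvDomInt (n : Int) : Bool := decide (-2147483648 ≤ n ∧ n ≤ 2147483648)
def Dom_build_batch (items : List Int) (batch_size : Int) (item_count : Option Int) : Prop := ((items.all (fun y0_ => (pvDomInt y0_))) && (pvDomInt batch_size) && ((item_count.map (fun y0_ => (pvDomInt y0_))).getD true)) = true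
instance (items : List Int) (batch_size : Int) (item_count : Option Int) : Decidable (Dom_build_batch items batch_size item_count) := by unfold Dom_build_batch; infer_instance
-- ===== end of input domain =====

-- B replaces A's streaming islice loop by closed-form cut offsets and index slicing; return value unchanged.

-- ===== PORT A =====
-- the while-True loop: `rest` is the not-yet-consumed part of the iterator, `k` is batch_count.
-- math.ceil(last_sum/2) on ints of this size is exactly floordiv (last_sum+1) 2.
-- islice's count is nonnegative whenever Pre_ holds; .toNat is exact there.
-- the if/elif/else selecting this iteration's islice length (remaining = ic - k*bs)
def a_size (bs ic k : Int) : Int :=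
  let remaining := ic - k * bs
  let uneven := PySem.Int.mod ic bs ≠ 0
  let last_sum := bs + PySem.Int.mod ic bs
  if uneven ∧ remaining < 2 * bs ∧ remaining > bs then PySem.Int.floordiv (last_sum + 1) 2
  else if uneven ∧ remaining < 2 * bs then PySem.Int.floordiv last_sum 2
  else bs

def build_batch_go (bs ic : Int) (k : Int) (rest : List Int) : List (List Int) :=
  let batch := rest.take (a_size bs ic k).toNat
  if h : batch.isEmpty then []
  else batch :: build_batch_go bs ic (k + 1) (rest.drop (a_size bs ic k).toNat)
termination_by rest.length
decreasing_by
  have h' : rest.take (a_size bs ic k).toNat ≠ [] := by simpa [batch, List.isEmpty_iff] using h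
  have h1 : rest ≠ [] := by intro he; simp [he] at h'
  have h2 : 0 < (a_size bs ic k).toNat := by
    rcases Nat.eq_zero_or_pos (a_size bs ic k).toNat with hz | hp
    · simp [hz] at h'
    · exact hp
  have h3 := List.length_pos_of_ne_nil h1
  simp only [List.length_drop]
  omega

def build_batch (items : List Int) (batch_size : Int) (item_count : Option Int) : List (List Int) :=
  -- `item_count = item_count or len(items)`: None and 0 are falsy
  let ic : Int := match item_count with
    | none => (items.length : Int)
    | some c => if c = 0 then (items.length : Int) else c
  build_batch_go batch_size ic 0 items

-- ===== PORT B =====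
-- _chunk(xs, k) = [xs[i:i+k] for i in range(0, len(xs), k)]
def chunkB (xs : List Int) (k : Int) : List (List Int) :=
  (PySem.List.pyRange 0 (xs.length : Int) k).map
    (fun i => PySem.List.slice xs (some i) (some (i + k)))

def build_batch_alt (items : List Int) (batch_size : Int) (item_count : Option Int) : List (List Int) :=
  let xs := items
  let n : Int := match item_count with
    | none => (xs.length : Int)
    | some c => if c = 0 then (xs.length : Int) else c
  let r := PySem.Int.mod n batch_size
  if r = 0 then chunkB xs batch_size
  else
    let q := PySem.Int.floordiv n batch_size
    let lo := PySem.Int.floordiv (batch_size + r) 2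
    let hi := batch_size + r - lo
    let cut := (max (q - 1) 0) * batch_size
    let mid := if q ≥ 1 then PySem.List.slice xs (some cut) (some (cut + hi)) else []
    let tail_start := cut + (if q ≥ 1 then hi else 0)
    chunkB (PySem.List.slice xs none (some cut)) batch_size
      ++ (if mid = [] then [] else [mid])
      ++ chunkB (PySem.List.slice xs (some tail_start) none) lo

-- ===== PRECONDITION & SPEC =====
-- A raises on batch_size = 0 (ZeroDivisionError) and batch_size < 0 (islice ValueError); Pre_ excludes exactly those.
def Pre_build_batch (items : List Int) (batch_size : Int) (item_count : Option Int) : Prop := 1 ≤ batch_size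
instance (items : List Int) (batch_size : Int) (item_count : Option Int) : Decidable (Pre_build_batch items batch_size item_count) := by unfold Pre_build_batch; infer_instance

def pvWitness_build_batch : List Int × Int × Option Int := ([1, 2, 3, 4, 5, 6, 7], 3, none)

def Spec_build_batch (items : List Int) (batch_size : Int) (item_count : Option Int) (out : List (List Int)) : Prop := out = build_batch_alt items batch_size item_count
instance (items : List Int) (batch_size : Int) (item_count : Option Int) (out : List (List Int)) : Decidable (Spec_build_batch items batch_size item_count out) := by unfold Spec_build_batch; infer_instance

-- ===== CLAIM (what is proved, stated in full; the proofs are below) =====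
def Claim_equal_build_batch : Prop := ∀ (items : List Int) (batch_size : Int) (item_count : Option Int), Dom_build_batch items batch_size item_count → Pre_build_batch items batch_size item_count → Spec_build_batch items batch_size item_count (build_batch items batch_size item_count)

-- ===== LEMMAS AND PROOFS =====

-- proof-only helpers: the uniform-tail / finite-head "schedule" consumption both programs are reduced to
def alt_tail (size : Int) (rest : List Int) : List (List Int) :=
  let batch := rest.take size.toNat
  if h : batch.isEmpty then []
  else batch :: alt_tail size (rest.drop size.toNat)
termination_by rest.length
decreasing_by
  have h' : rest.take size.toNat ≠ [] := by simpa [batch, List.isEmpty_iff] using h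
  have h1 : rest ≠ [] := by intro he; simp [he] at h'
  have h2 : 0 < size.toNat := by
    rcases Nat.eq_zero_or_pos size.toNat with hz | hp
    · simp [hz] at h'
    · exact hp
  have h3 := List.length_pos_of_ne_nil h1
  simp only [List.length_drop]
  omega

def alt_sched (head : List Int) (tailSize : Int) (rest : List Int) : List (List Int) :=
  match head with
  | [] => alt_tail tailSize rest
  | s :: ss =>
      let batch := rest.take s.toNat
      if batch.isEmpty then []
      else batch :: alt_sched ss tailSize (rest.drop s.toNat)

theorem remaining_decomp (bs ic k : Int) :
    ic - k * bs = (PySem.Int.floordiv ic bs - k) * bs + PySem.Int.mod ic bs := by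
  have h := PySem.Int.floordiv_mul_add_mod ic bs
  linear_combination -h

theorem mod_bounds (ic bs : Int) (hbs : 0 < bs) :
    0 ≤ PySem.Int.mod ic bs ∧ PySem.Int.mod ic bs < bs := by
  rw [PySem.Int.mod_eq_emod_of_pos hbs]
  constructor
  · exact Int.emod_nonneg ic (by omega)
  · exact Int.emod_lt_of_pos ic hbs

theorem a_size_full (bs ic k : Int) (hbs : 0 < bs) (hk : k ≤ PySem.Int.floordiv ic bs - 2) :
    a_size bs ic k = bs := by
  have hd := remaining_decomp bs ic k
  have hm := mod_bounds ic bs hbs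
  have hmul : 2 * bs ≤ (PySem.Int.floordiv ic bs - k) * bs :=
    mul_le_mul_of_nonneg_right (by omega) (by omega)
  unfold a_size
  have h2 : ¬ (ic - k * bs < 2 * bs) := by omega
  simp [h2]

theorem a_size_ceil (bs ic k : Int) (hbs : 0 < bs) (hr : PySem.Int.mod ic bs ≠ 0)
    (hk : k = PySem.Int.floordiv ic bs - 1) :
    a_size bs ic k = PySem.Int.floordiv (bs + PySem.Int.mod ic bs + 1) 2 := by
  have hd := remaining_decomp bs ic k
  have hm := mod_bounds ic bs hbs
  have h1 : (PySem.Int.floordiv ic bs - k) * bs = bs := by rw [hk]; ring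
  unfold a_size
  have hlt : ic - k * bs < 2 * bs := by omega
  have hgt : ic - k * bs > bs := by omega
  simp [hr, hlt, hgt]

theorem a_size_floor (bs ic k : Int) (hbs : 0 < bs) (hr : PySem.Int.mod ic bs ≠ 0)
    (hk : PySem.Int.floordiv ic bs ≤ k) :
    a_size bs ic k = PySem.Int.floordiv (bs + PySem.Int.mod ic bs) 2 := by
  have hd := remaining_decomp bs ic k
  have hm := mod_bounds ic bs hbs
  have hmul : (PySem.Int.floordiv ic bs - k) * bs ≤ 0 :=
    mul_nonpos_of_nonpos_of_nonneg (by omega) (by omega)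
  unfold a_size
  have hlt : ic - k * bs < 2 * bs := by omega
  have hgt : ¬ (ic - k * bs > bs) := by omega
  simp [hr, hlt, hgt]

theorem a_size_even (bs ic k : Int) (hr : PySem.Int.mod ic bs = 0) :
    a_size bs ic k = bs := by
  simp [a_size, hr]

-- ceil(x/2) = x - floor(x/2)
theorem ceil_half (x : Int) :
    PySem.Int.floordiv (x + 1) 2 = x - PySem.Int.floordiv x 2 := by
  rw [PySem.Int.floordiv_eq_ediv_of_pos (show (0:Int) < 2 by omega),
      PySem.Int.floordiv_eq_ediv_of_pos (show (0:Int) < 2 by omega)]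
  omega

theorem go_even (bs ic : Int) (hr : PySem.Int.mod ic bs = 0) :
    ∀ (rest : List Int) (k : Int), build_batch_go bs ic k rest = alt_tail bs rest
  | rest, k => by
    rw [build_batch_go, alt_tail]
    simp only [a_size_even bs ic k hr]
    by_cases hb : (rest.take bs.toNat).isEmpty
    · rw [dif_pos hb, dif_pos hb]
    · rw [dif_neg hb, dif_neg hb]
      exact congrArg _ (go_even bs ic hr _ (k + 1))
termination_by rest _ => rest.length
decreasing_by
  have h' : rest.take bs.toNat ≠ [] := by intro he; rw [he] at hb; simp at hb
  have h1 : rest ≠ [] := by intro he; simp [he] at h'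
  have h2 : 0 < bs.toNat := by
    by_contra hz
    have hzz : bs.toNat = 0 := by omega
    rw [hzz] at h'; simp at h'
  have h3 := List.length_pos_of_ne_nil h1
  simp only [List.length_drop]
  omega

theorem go_floor (bs ic : Int) (hbs : 0 < bs) (hr : PySem.Int.mod ic bs ≠ 0) :
    ∀ (rest : List Int) (k : Int), PySem.Int.floordiv ic bs ≤ k →
      build_batch_go bs ic k rest = alt_tail (PySem.Int.floordiv (bs + PySem.Int.mod ic bs) 2) rest
  | rest, k, hk => by
    rw [build_batch_go, alt_tail]
    simp only [a_size_floor bs ic k hbs hr hk]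
    by_cases hb : (rest.take (PySem.Int.floordiv (bs + PySem.Int.mod ic bs) 2).toNat).isEmpty
    · rw [dif_pos hb, dif_pos hb]
    · rw [dif_neg hb, dif_neg hb]
      exact congrArg _ (go_floor bs ic hbs hr _ (k + 1) (by omega))
termination_by rest _ _ => rest.length
decreasing_by
  have h' : rest.take (PySem.Int.floordiv (bs + PySem.Int.mod ic bs) 2).toNat ≠ [] := by
    intro he; rw [he] at hb; simp at hb
  have h1 : rest ≠ [] := by intro he; simp [he] at h'
  have h2 : 0 < (PySem.Int.floordiv (bs + PySem.Int.mod ic bs) 2).toNat := by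
    by_contra hz
    have hzz : (PySem.Int.floordiv (bs + PySem.Int.mod ic bs) 2).toNat = 0 := by omega
    rw [hzz] at h'; simp at h'
  have h3 := List.length_pos_of_ne_nil h1
  simp only [List.length_drop]
  omega

theorem go_head (bs ic : Int) (hbs : 0 < bs) (hr : PySem.Int.mod ic bs ≠ 0) :
    ∀ (rest : List Int) (k : Int), k ≤ PySem.Int.floordiv ic bs - 1 →
      build_batch_go bs ic k rest =
        alt_sched
          (List.replicate (PySem.Int.floordiv ic bs - 1 - k).toNat bs ++
            [bs + PySem.Int.mod ic bs - PySem.Int.floordiv (bs + PySem.Int.mod ic bs) 2])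
          (PySem.Int.floordiv (bs + PySem.Int.mod ic bs) 2) rest
  | rest, k, hk => by
    by_cases hlast : k = PySem.Int.floordiv ic bs - 1
    · have hz : (PySem.Int.floordiv ic bs - 1 - k).toNat = 0 := by omega
      rw [build_batch_go]
      simp only [hz, List.replicate_zero, List.nil_append, alt_sched,
        a_size_ceil bs ic k hbs hr hlast, ceil_half (bs + PySem.Int.mod ic bs)]
      by_cases hb : (rest.take (bs + PySem.Int.mod ic bs - PySem.Int.floordiv (bs + PySem.Int.mod ic bs) 2).toNat).isEmpty
      · rw [dif_pos hb, if_pos hb]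
      · rw [dif_neg hb, if_neg hb]
        exact congrArg _ (go_floor bs ic hbs hr _ (k + 1) (by omega))
    · have hpos : 0 < (PySem.Int.floordiv ic bs - 1 - k).toNat := by omega
      have hrep : (PySem.Int.floordiv ic bs - 1 - k).toNat
          = ((PySem.Int.floordiv ic bs - 1 - (k + 1)).toNat) + 1 := by omega
      rw [build_batch_go]
      simp only [a_size_full bs ic k hbs (by omega), hrep, List.replicate_succ,
        List.cons_append, alt_sched]
      by_cases hb : (rest.take bs.toNat).isEmpty
      · rw [dif_pos hb, if_pos hb]
      · rw [dif_neg hb, if_neg hb]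
        exact congrArg _ (go_head bs ic hbs hr _ (k + 1) (by omega))
termination_by rest k _ => (PySem.Int.floordiv ic bs - 1 - k).toNat
decreasing_by
  omega

-- B-side: the slice-comprehension chunker equals the uniform-tail recursion
theorem chunkB_nil (k : Int) : chunkB [] k = [] := by
  simp [chunkB, PySem.List.pyRange]

theorem chunkB_cons (k : Int) (hk : 0 < k) (xs : List Int) (hxs : xs ≠ []) :
    chunkB xs k = xs.take k.toNat :: chunkB (xs.drop k.toNat) k := by
  obtain ⟨b, hb⟩ : ∃ b : Nat, k = (b : Int) := ⟨k.toNat, (Int.toNat_of_nonneg (by omega)).symm⟩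
  have hbpos : 0 < b := by omega
  have hlen : 0 < xs.length := List.length_pos_of_ne_nil hxs
  subst hb
  rw [chunkB, chunkB, PySem.List.pyRange_of_pos _ _ (by exact_mod_cast hbpos),
      PySem.List.pyRange_of_pos _ _ (by exact_mod_cast hbpos)]
  have hdrop : ((xs.drop ((b:Int)).toNat).length : Int) = (xs.length : Int) - b + ((b:Int) - (xs.length:Int)).toNat := by
    simp [List.length_drop]; omega
  -- counts
  have hcount : (if (0:Int) < (xs.length:Int) then ((((xs.length:Int)) - 0 + b - 1) / b).toNat else 0)
      = (if (0:Int) < ((xs.drop ((b:Int)).toNat).length : Int) then ((((xs.drop ((b:Int)).toNat).length : Int) - 0 + b - 1) / b).toNat else 0) + 1 := by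
    rw [if_pos (by exact_mod_cast hlen)]
    by_cases hsmall : xs.length ≤ b
    · have hz : (xs.drop ((b:Int)).toNat).length = 0 := by simp [List.length_drop]; omega
      rw [hz]
      simp only [Nat.cast_zero]
      rw [if_neg (by omega)]
      have h1 : ((xs.length:Int) - 0 + b - 1) = ((xs.length:Int) - 1) + 1 * b := by ring
      have h2 : ((xs.length:Int) - 1) / b = 0 :=
        Int.ediv_eq_zero_of_lt (by omega) (by omega)
      rw [h1, Int.add_mul_ediv_right _ _ (by omega : (b:Int) ≠ 0), h2]
      decide
    · have hlen2 : (xs.drop ((b:Int)).toNat).length = xs.length - b := by simp [List.length_drop]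
      rw [hlen2, if_pos (by omega)]
      have hsplit : ((xs.length:Int) - 0 + b - 1) = (((xs.length - b : Nat):Int) - 0 + b - 1) + 1 * b := by
        omega
      rw [hsplit, Int.add_mul_ediv_right _ _ (by omega : (b:Int) ≠ 0)]
      have hx : 0 ≤ (((xs.length - b : Nat):Int) - 0 + b - 1) / b :=
        Int.ediv_nonneg (by omega) (by omega)
      omega
  rw [hcount]
  simp only [List.range_succ_eq_map, List.map_cons, List.map_map, Function.comp_def]
  congr 1
  · -- head chunk: xs[0:0+b] = xs.take b
    have h0 : (0:Int) + (b:Int) * ((0:Nat):Int) = ((0:Nat):Int) := by push_cast; ring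
    rw [h0, PySem.List.slice_natCast_add xs 0 b]
    simp
  · -- remaining chunks, index shift by one
    apply List.map_congr_left
    intro j _
    simp only [Nat.succ_eq_add_one]
    have h1 : (0:Int) + (b:Int) * ((j : Nat) + 1 : Nat) = ((b + b * j : Nat) : Int) := by push_cast; ring
    have h2 : (0:Int) + (b:Int) * (j:Nat) = ((b * j : Nat) : Int) := by push_cast; ring
    rw [h1, h2, PySem.List.slice_natCast_add, PySem.List.slice_natCast_add, List.drop_drop]
    simp

theorem chunkB_eq_tail (k : Int) (hk : 0 < k) :
    ∀ (xs : List Int), chunkB xs k = alt_tail k xs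
  | xs => by
    rw [alt_tail]
    by_cases hxs : xs = []
    · subst hxs
      simp only [List.take_nil, List.isEmpty_nil, dite_true]
      exact chunkB_nil k
    · have hkt : ¬ k.toNat = 0 := by omega
      have hb : ¬ (xs.take k.toNat).isEmpty := by
        simp [List.isEmpty_iff, List.take_eq_nil_iff, hxs, hkt]
      rw [dif_neg hb, chunkB_cons k hk xs hxs]
      have hlt : (xs.drop k.toNat).length < xs.length := by
        have h1 := List.length_pos_of_ne_nil hxs
        simp only [List.length_drop]
        omega
      exact congrArg _ (chunkB_eq_tail k hk (xs.drop k.toNat))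
termination_by xs => xs.length
decreasing_by
  exact hlt

-- the three-region slice decomposition equals the finite-head schedule
theorem sched_split (bs lo hi : Int) (hbs : 0 < bs) (hlo : 0 < lo) (hhi : 0 < hi) :
    ∀ (m : Nat) (xs : List Int),
      alt_sched (List.replicate m bs ++ [hi]) lo xs
        = chunkB (xs.take (m * bs.toNat)) bs
          ++ (if (xs.drop (m * bs.toNat)).take hi.toNat = [] then []
              else [(xs.drop (m * bs.toNat)).take hi.toNat])
          ++ chunkB ((xs.drop (m * bs.toNat)).drop hi.toNat) lo := by
  intro m
  induction m with
  | zero =>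
    intro xs
    simp only [List.replicate_zero, List.nil_append, alt_sched, Nat.zero_mul,
      List.take_zero, List.drop_zero, chunkB_nil, List.nil_append]
    by_cases hxs : xs = []
    · subst hxs
      simp [chunkB_nil]
    · have hht : ¬ hi.toNat = 0 := by omega
      have hne : ¬ (xs.take hi.toNat).isEmpty := by
        simp [List.isEmpty_iff, List.take_eq_nil_iff, hxs, hht]
      rw [if_neg hne, if_neg (by simpa [List.isEmpty_iff] using hne)]
      simp only [List.cons_append, List.nil_append]
      exact congrArg _ (chunkB_eq_tail lo hlo _).symm
  | succ m ih =>
    intro xs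
    simp only [List.replicate_succ, List.cons_append, alt_sched]
    by_cases hxs : xs = []
    · subst hxs
      simp [chunkB_nil]
    · have hbt : ¬ bs.toNat = 0 := by omega
      have hne : ¬ (xs.take bs.toNat).isEmpty := by
        simp [List.isEmpty_iff, List.take_eq_nil_iff, hxs, hbt]
      rw [if_neg hne, ih (xs.drop bs.toNat)]
      have hmul : (m + 1) * bs.toNat ≠ 0 := Nat.mul_ne_zero (Nat.succ_ne_zero m) hbt
      have htake : (xs.take ((m + 1) * bs.toNat)) ≠ [] := by
        simp [List.take_eq_nil_iff, hxs, hmul]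
      rw [chunkB_cons bs hbs _ htake]
      have hble : bs.toNat ≤ (m + 1) * bs.toNat := by
        calc bs.toNat = 1 * bs.toNat := (Nat.one_mul _).symm
        _ ≤ (m + 1) * bs.toNat := Nat.mul_le_mul_right _ (by omega)
      have hsub : (m + 1) * bs.toNat - bs.toNat = m * bs.toNat := by
        rw [Nat.succ_mul]
        omega
      have h1 : (xs.take ((m + 1) * bs.toNat)).take bs.toNat = xs.take bs.toNat := by
        rw [List.take_take]
        congr 1
        exact Nat.min_eq_left hble
      have h2 : (xs.take ((m + 1) * bs.toNat)).drop bs.toNat = (xs.drop bs.toNat).take (m * bs.toNat) := by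
        rw [List.drop_take, hsub]
      have h3 : xs.drop ((m + 1) * bs.toNat) = (xs.drop bs.toNat).drop (m * bs.toNat) := by
        rw [List.drop_drop]
        congr 1
        rw [Nat.succ_mul]
        omega
      rw [h1, h2, h3]
      simp only [List.cons_append]

-- the heart of the proof, over an arbitrary effective count ic
theorem core_eq (bs ic : Int) (hbs : 0 < bs) (xs : List Int) :
    build_batch_go bs ic 0 xs =
      (if PySem.Int.mod ic bs = 0 then chunkB xs bs
       else
        chunkB (PySem.List.slice xs none (some (max (PySem.Int.floordiv ic bs - 1) 0 * bs))) bs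
          ++ (if (if PySem.Int.floordiv ic bs ≥ 1 then
                    PySem.List.slice xs (some (max (PySem.Int.floordiv ic bs - 1) 0 * bs))
                      (some (max (PySem.Int.floordiv ic bs - 1) 0 * bs +
                        (bs + PySem.Int.mod ic bs -
                          PySem.Int.floordiv (bs + PySem.Int.mod ic bs) 2)))
                  else []) = [] then []
              else [if PySem.Int.floordiv ic bs ≥ 1 then
                      PySem.List.slice xs (some (max (PySem.Int.floordiv ic bs - 1) 0 * bs))
                        (some (max (PySem.Int.floordiv ic bs - 1) 0 * bs +
                          (bs + PySem.Int.mod ic bs -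
                            PySem.Int.floordiv (bs + PySem.Int.mod ic bs) 2)))
                    else []])
          ++ chunkB (PySem.List.slice xs (some (max (PySem.Int.floordiv ic bs - 1) 0 * bs +
                (if PySem.Int.floordiv ic bs ≥ 1 then
                  bs + PySem.Int.mod ic bs - PySem.Int.floordiv (bs + PySem.Int.mod ic bs) 2
                 else 0))) none)
              (PySem.Int.floordiv (bs + PySem.Int.mod ic bs) 2)) := by
  by_cases hr : PySem.Int.mod ic bs = 0
  · rw [if_pos hr]
    rw [chunkB_eq_tail bs hbs]
    exact go_even bs ic hr xs 0
  · rw [if_neg hr]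
    have hm := mod_bounds ic bs hbs
    have hlo : 0 < PySem.Int.floordiv (bs + PySem.Int.mod ic bs) 2 := by
      rw [PySem.Int.floordiv_eq_ediv_of_pos (show (0:Int) < 2 by omega)]
      omega
    set r := PySem.Int.mod ic bs with hrdef
    set lo := PySem.Int.floordiv (bs + r) 2 with hlodef
    set q := PySem.Int.floordiv ic bs with hqdef
    have hhi : 0 < bs + r - lo := by
      rw [hlodef, PySem.Int.floordiv_eq_ediv_of_pos (show (0:Int) < 2 by omega)]
      omega
    by_cases hq : q ≥ 1
    · simp only [if_pos hq]
      have hmax : max (q - 1) 0 = q - 1 := by omega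
      rw [hmax]
      have hA := go_head bs ic hbs hr xs 0 (by omega)
      simp only [sub_zero] at hA
      rw [hA, sched_split bs lo (bs + r - lo) hbs hlo hhi (q - 1).toNat xs]
      -- convert the take/drop form into Source B's slices
      have hcutnn : 0 ≤ (q - 1) * bs :=
        mul_nonneg (by omega) (by omega)
      have hcut : ((q - 1) * bs).toNat = (q - 1).toNat * bs.toNat := by
        obtain ⟨m, hm'⟩ : ∃ m : Nat, q - 1 = (m : Int) := ⟨(q-1).toNat, (Int.toNat_of_nonneg (by omega)).symm⟩
        obtain ⟨b, hb'⟩ : ∃ b : Nat, bs = (b : Int) := ⟨bs.toNat, (Int.toNat_of_nonneg (by omega)).symm⟩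
        rw [hm', hb', ← Nat.cast_mul, Int.toNat_natCast, Int.toNat_natCast, Int.toNat_natCast]
      rw [PySem.List.slice_to _ hcutnn, hcut]
      rw [PySem.List.slice_toNat _ hcutnn (by omega)]
      rw [PySem.List.slice_from _ (by omega)]
      have h4 : ((q - 1) * bs + (bs + r - lo)).toNat - ((q - 1) * bs).toNat
          = (bs + r - lo).toNat := by omega
      have h5 : ((q - 1) * bs + (bs + r - lo)).toNat
          = ((q - 1) * bs).toNat + (bs + r - lo).toNat := by omega
      rw [h4, h5, ← List.drop_drop, hcut]
    · simp only [if_neg hq]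
      have hmax : max (q - 1) 0 = 0 := by omega
      rw [hmax]
      have e1 : PySem.List.slice xs none (some ((0:Int) * bs)) = [] := by
        rw [zero_mul, PySem.List.slice_to _ (le_refl 0)]
        simp
      have e2 : PySem.List.slice xs (some ((0:Int) * bs + 0)) none = xs := by
        rw [zero_mul, add_zero, PySem.List.slice_zero_start, PySem.List.slice_none_none]
      rw [e1, e2, chunkB_nil, chunkB_eq_tail lo hlo, go_floor bs ic hbs hr xs 0 (by omega),
        ← hrdef, ← hlodef]
      simp

-- ===== VERDICT (by name: the statement is the Claim_ definition above) =====
theorem build_batch_spec : Claim_equal_build_batch := by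
  intro items batch_size item_count _ hpre
  have hbs : 0 < batch_size := hpre
  unfold Spec_build_batch build_batch build_batch_alt
  dsimp only
  exact core_eq batch_size _ hbs items
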